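-- pv_equiv track=rewrite | github.com/ZhiGuangLu/qcs | qcs_phy/__init__.py | covert_to_decimals
-- ===== SOURCE A (Python) =====
-- def covert_to_decimals(num_list: list, m: int) -> list:
--     """
--     :param `num_list`: list
--
--     :param `m`: the number of input modes
--
--     :return ` `list
--     """
--     decimals = []
--     n = len(num_list)
--     for k in range(1, n + 1):
--         num = num_list[:k]
--         decimal = 0
--         for i in range(k):
--             decimal += num[i] * (m ** (k - 1 - i))
--         decimals.append(decimal)
--     return decimals
-- ===== SOURCE B (Python) =====
-- def covert_to_decimals(num_list: list, m: int) -> list: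
--     decimals = []
--     decimal = 0
--     for x in num_list:
--         decimal = decimal * m + x
--         decimals.append(decimal)
--     return decimals
-- ===== Notes on version B (the rewrite author's own statement) =====
-- stated objective: faster
-- what changed: Replaces the quadratic re-evaluation of each prefix (slice + inner power-sum loop per k) by a single Horner pass that updates the running value as decimal = decimal*m + x.
import Mathlib
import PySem

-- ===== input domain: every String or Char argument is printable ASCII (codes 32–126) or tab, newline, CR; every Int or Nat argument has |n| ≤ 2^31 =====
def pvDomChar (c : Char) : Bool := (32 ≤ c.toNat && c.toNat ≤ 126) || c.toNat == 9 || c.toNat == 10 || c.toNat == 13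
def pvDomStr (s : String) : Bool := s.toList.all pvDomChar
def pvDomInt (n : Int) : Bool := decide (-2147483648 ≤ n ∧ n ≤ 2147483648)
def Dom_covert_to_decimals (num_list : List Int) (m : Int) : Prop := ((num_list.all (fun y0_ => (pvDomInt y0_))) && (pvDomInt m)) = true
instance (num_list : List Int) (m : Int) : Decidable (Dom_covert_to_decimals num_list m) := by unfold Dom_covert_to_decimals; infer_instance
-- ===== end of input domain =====

-- B replaces A's per-prefix slice + power-sum inner loop (quadratic) by one Horner pass (linear).

-- ===== PORT A =====
-- 'm ** (k-1-i)' always has exponent ≥ 0 here, so Int power with .toNat exponent is exact.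
def covert_to_decimals (num_list : List Int) (m : Int) : List Int :=
  let n : Int := num_list.length
  (PySem.List.pyRange 1 (n + 1) 1).foldl
    (fun decimals k =>
      let num := PySem.List.slice num_list none (some k)
      let decimal := (PySem.List.pyRange 0 k 1).foldl
        (fun decimal i => decimal + PySem.List.pyGetD num i 0 * m ^ (k - 1 - i).toNat) 0
      decimals ++ [decimal]) []

-- ===== PORT B =====
def covert_to_decimals_alt (num_list : List Int) (m : Int) : List Int :=
  (num_list.foldl
    (fun (st : List Int × Int) x =>
      let d := st.2 * m + x
      (st.1 ++ [d], d)) ([], 0)).1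

-- ===== PRECONDITION & SPEC =====
def Spec_covert_to_decimals (num_list : List Int) (m : Int) (out : List Int) : Prop := out = covert_to_decimals_alt num_list m
instance (num_list : List Int) (m : Int) (out : List Int) : Decidable (Spec_covert_to_decimals num_list m out) := by unfold Spec_covert_to_decimals; infer_instance

-- ===== CLAIM (what is proved, stated in full; the proofs are below) =====
def Claim_equal_covert_to_decimals : Prop := ∀ (num_list : List Int) (m : Int), Dom_covert_to_decimals num_list m → Spec_covert_to_decimals num_list m (covert_to_decimals num_list m)

-- ===== LEMMAS AND PROOFS =====

-- value of l read as base-m digits starting from accumulator d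
def pvHorner (m d : Int) (l : List Int) : Int := l.foldl (fun a x => a * m + x) d

-- the list of running Horner values (B's outputs)
def pvScan (m d : Int) : List Int → List Int
  | [] => []
  | x :: t => (d * m + x) :: pvScan m (d * m + x) t

theorem pvScan_eq_map_range (m : Int) : ∀ (l : List Int) (d : Int),
    pvScan m d l = (List.range l.length).map (fun j => pvHorner m d (l.take (j + 1))) := by
  intro l
  induction l with
  | nil => intro d; simp [pvScan]
  | cons x t ih =>
    intro d
    simp only [pvScan, List.length_cons, List.range_succ_eq_map, List.map_cons, List.map_map]
    rw [ih (d * m + x)]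
    congr 1

theorem alt_foldl (m : Int) : ∀ (l : List Int) (acc : List Int) (d : Int),
    (l.foldl (fun (st : List Int × Int) x => (st.1 ++ [st.2 * m + x], st.2 * m + x)) (acc, d)).1
      = acc ++ pvScan m d l := by
  intro l
  induction l with
  | nil => intro acc d; simp [pvScan]
  | cons x t ih => intro acc d; simp [pvScan, ih, List.append_assoc]

theorem pvHorner_append (m d : Int) (l : List Int) (x : Int) :
    pvHorner m d (l ++ [x]) = pvHorner m d l * m + x := by
  simp [pvHorner, List.foldl_append]

-- A's inner loop as a sum equals the Horner value of the prefix
theorem inner_sum_eq_horner (m : Int) : ∀ (num : List Int),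
    ((List.range num.length).map
      (fun j => num.getD j 0 * m ^ ((num.length : Int) - 1 - (j : Int)).toNat)).sum
      = pvHorner m 0 num := by
  intro num
  induction num using List.reverseRecOn with
  | nil => simp [pvHorner]
  | append_singleton t x ih =>
    rw [pvHorner_append, ← ih]
    simp only [List.length_append, List.length_cons, List.length_nil]
    rw [List.range_succ, List.map_append, List.sum_append]
    have h1 : (List.range t.length).map
        (fun j => (t ++ [x]).getD j 0 * m ^ (((t.length + 1 : Nat) : Int) - 1 - (j : Int)).toNat)
        = (List.range t.length).map
        (fun j => (t.getD j 0 * m ^ (((t.length : Nat) : Int) - 1 - (j : Int)).toNat) * m) := by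
      apply List.map_congr_left
      intro j hj
      rw [List.mem_range] at hj
      have hget : (t ++ [x]).getD j 0 = t.getD j 0 := by
        simp [List.getD, List.getElem?_append_left hj]
      have hexp : (((t.length + 1 : Nat) : Int) - 1 - (j : Int)).toNat
          = (((t.length : Nat) : Int) - 1 - (j : Int)).toNat + 1 := by omega
      rw [hget, hexp, pow_succ, mul_assoc]
    rw [h1, List.sum_map_mul_right]
    simp

-- A's output is the list of Horner values of the prefixes
theorem covert_eq_map_range (num_list : List Int) (m : Int) :
    covert_to_decimals num_list m
      = (List.range num_list.length).map (fun j => pvHorner m 0 (num_list.take (j + 1))) := by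
  unfold covert_to_decimals
  rw [PySem.List.foldl_append_singleton_eq_map]
  rw [PySem.List.pyRange_one 1 ((num_list.length : Int) + 1)]
  simp only [List.nil_append]
  have hn : (((num_list.length : Int)) + 1 - 1).toNat = num_list.length := by omega
  rw [hn, List.map_map]
  apply List.map_congr_left
  intro j hj
  rw [List.mem_range] at hj
  simp only [Function.comp_apply]
  have hsl : PySem.List.slice num_list none (some (1 + (j : Int))) = num_list.take (j + 1) := by
    have : (1 + (j : Int)) = ((j + 1 : Nat) : Int) := by push_cast; ring
    rw [this, PySem.List.slice_to_natCast]
  rw [hsl]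
  set num := num_list.take (j + 1) with hnum
  have hlen : num.length = j + 1 := by
    rw [hnum, List.length_take]; omega
  rw [PySem.List.foldl_add, PySem.List.pyRange_one 0 (1 + (j : Int))]
  have hto : ((1 : Int) + (j : Int) - 0).toNat = j + 1 := by omega
  rw [hto, List.map_map, zero_add]
  have := inner_sum_eq_horner m num
  rw [hlen] at this
  rw [← this]
  apply congrArg
  apply List.map_congr_left
  intro i hi
  rw [List.mem_range] at hi
  simp only [Function.comp_apply, zero_add, PySem.List.pyGetD_natCast]
  congr 2
  omega

-- ===== VERDICT (by name: the statement is the Claim_ definition above) =====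
theorem covert_to_decimals_spec : Claim_equal_covert_to_decimals := by
  intro num_list m _
  unfold Spec_covert_to_decimals covert_to_decimals_alt
  rw [alt_foldl m num_list [] 0, List.nil_append, pvScan_eq_map_range m num_list 0,
    covert_eq_map_range]
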